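-- pv_equiv track=rewrite | github.com/fabianastudillo/BiomecanicaPatinaje | Frontal_simple.py | get_problem
-- ===== SOURCE A (Python) =====
-- def get_problem(arr):
--     no_problem=[]
--
--     for i in range(len(arr)-1):
--         if arr[i+1]-arr[i]>40:
--             no_problem=no_problem+list(range(arr[i],arr[i+1]))
--
--     positions=list(range(arr[-1]))
--
--     problem=sorted(set(positions)-set(no_problem))
--
--     return problem
-- ===== SOURCE B (Python) =====
-- def get_problem(arr):
--     last = arr[-1]
--     out = []
--     cur = 0
--     for a, b in sorted((x, y) for x, y in zip(arr, arr[1:]) if y - x > 40):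
--         out.extend(range(cur, min(a, last)))
--         cur = max(cur, b)
--     out.extend(range(cur, last))
--     return out
-- ===== Notes on version B (the rewrite author's own statement) =====
-- stated objective: faster
-- what changed: B sorts the few large-gap neighbour intervals and emits the complement of their union over range(last element) in one linear sweep with list.extend, replacing A's repeated quadratic list concatenation of excluded ranges followed by sorted(set(positions)-set(no_problem)).
import Mathlib
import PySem

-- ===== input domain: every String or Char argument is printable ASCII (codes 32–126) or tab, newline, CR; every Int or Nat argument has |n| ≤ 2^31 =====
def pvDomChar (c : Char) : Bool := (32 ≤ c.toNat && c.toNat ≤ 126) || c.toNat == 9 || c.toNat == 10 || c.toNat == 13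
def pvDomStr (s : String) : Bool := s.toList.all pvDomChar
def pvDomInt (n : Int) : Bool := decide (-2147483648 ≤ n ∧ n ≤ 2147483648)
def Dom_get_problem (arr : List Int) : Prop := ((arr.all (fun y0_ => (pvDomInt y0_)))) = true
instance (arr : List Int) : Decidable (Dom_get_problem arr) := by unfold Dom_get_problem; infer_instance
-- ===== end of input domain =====

-- B sorts the large-gap neighbour intervals and emits the complement of their union
-- in one linear sweep, replacing A's repeated quadratic list concatenation and
-- sorted(set(positions)-set(no_problem)).

-- ===== PORT A =====
def get_problem (arr : List Int) : List Int :=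
  let no_problem : List Int :=
    (PySem.List.pyRange 0 ((arr.length : Int) - 1)).foldl
      (fun acc i =>
        if PySem.List.pyGetD arr (i + 1) 0 - PySem.List.pyGetD arr i 0 > 40 then
          acc ++ PySem.List.pyRange (PySem.List.pyGetD arr i 0) (PySem.List.pyGetD arr (i + 1) 0)
        else acc) []
  let positions : List Int := PySem.List.pyRange 0 (PySem.List.pyGetD arr (-1) 0)
  PySem.List.sorted
    (PySem.Set.diff (PySem.Set.ofList positions) (PySem.Set.ofList no_problem))
    (fun x => x) false

-- ===== PORT B =====
def get_problem_alt (arr : List Int) : List Int :=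
  let last := PySem.List.pyGetD arr (-1) 0
  let ivs := PySem.List.sorted2 ((arr.zip arr.tail).filter (fun p => p.2 - p.1 > 40))
    (fun p => p.1) (fun p => p.2) false
  let st := ivs.foldl (fun (s : List Int × Int) iv =>
      (s.1 ++ PySem.List.pyRange s.2 (min iv.1 last), max s.2 iv.2)) ([], 0)
  st.1 ++ PySem.List.pyRange st.2 last

-- ===== PRECONDITION & SPEC =====
-- Pre_ excludes only the empty list, on which Python A raises IndexError reading the last element.
def Pre_get_problem (arr : List Int) : Prop := arr ≠ []
instance (arr : List Int) : Decidable (Pre_get_problem arr) := by unfold Pre_get_problem; infer_instance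
def pvWitness_get_problem : List Int := ([0, 50, 60])

def Spec_get_problem (arr : List Int) (out : List Int) : Prop := out = get_problem_alt arr
instance (arr : List Int) (out : List Int) : Decidable (Spec_get_problem arr out) := by unfold Spec_get_problem; infer_instance

-- ===== CLAIM (what is proved, stated in full; the proofs are below) =====
def Claim_equal_get_problem : Prop := ∀ (arr : List Int), Dom_get_problem arr → Pre_get_problem arr → Spec_get_problem arr (get_problem arr)

-- ===== LEMMAS AND PROOFS =====

-- Indexed neighbour pairs are the zip of the list with its tail.
theorem zip_tail_eq_range_map (l : List Int) :
    l.zip l.tail = (List.range (l.length - 1)).map (fun k => (l.getD k 0, l.getD (k + 1) 0)) := by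
  induction l with
  | nil => simp
  | cons x t ih =>
    cases t with
    | nil => simp
    | cons y t =>
      simp only [List.zip_cons_cons, List.tail_cons] at ih ⊢
      rw [ih]
      simp only [List.length_cons, Nat.add_sub_cancel, List.range_succ_eq_map,
        List.map_cons, List.map_map]
      congr 1

-- A's loop over indices builds the flatMap of the gap ranges over zipped pairs.
theorem no_problem_eq (arr : List Int) :
    (PySem.List.pyRange 0 ((arr.length : Int) - 1)).foldl
      (fun acc i =>
        if PySem.List.pyGetD arr (i + 1) 0 - PySem.List.pyGetD arr i 0 > 40 then
          acc ++ PySem.List.pyRange (PySem.List.pyGetD arr i 0) (PySem.List.pyGetD arr (i + 1) 0)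
        else acc) []
    = (arr.zip arr.tail).flatMap
      (fun p => if p.2 - p.1 > 40 then PySem.List.pyRange p.1 p.2 else []) := by
  have hbody : ∀ (acc : List Int) (i : Int),
      (if PySem.List.pyGetD arr (i + 1) 0 - PySem.List.pyGetD arr i 0 > 40 then
          acc ++ PySem.List.pyRange (PySem.List.pyGetD arr i 0) (PySem.List.pyGetD arr (i + 1) 0)
        else acc)
      = acc ++ (if PySem.List.pyGetD arr (i + 1) 0 - PySem.List.pyGetD arr i 0 > 40 then
          PySem.List.pyRange (PySem.List.pyGetD arr i 0) (PySem.List.pyGetD arr (i + 1) 0) else []) := by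
    intro acc i; split <;> simp
  have hlen : ((arr.length : Int) - 1) = ((arr.length - 1 : Nat) : Int) ∨ arr = [] := by
    cases arr with
    | nil => right; rfl
    | cons x t => left; simp
  rcases hlen with h | h
  · rw [h, PySem.List.pyRange_zero_natCast]
    simp only [List.foldl_map, hbody]
    rw [PySem.List.foldl_append_eq_flatMap
      (g := fun (k : Nat) => (if PySem.List.pyGetD arr ((k : Int) + 1) 0 - PySem.List.pyGetD arr (k : Int) 0 > 40 then
          PySem.List.pyRange (PySem.List.pyGetD arr (k : Int) 0) (PySem.List.pyGetD arr ((k : Int) + 1) 0) else []))]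
    rw [zip_tail_eq_range_map, List.flatMap_map, List.nil_append]
    apply List.flatMap_congr
    intro k hk
    have h1 : ((k : Int) + 1) = ((k + 1 : Nat) : Int) := by push_cast; ring
    rw [h1, PySem.List.pyGetD_natCast, PySem.List.pyGetD_natCast]
  · subst h; rfl

theorem pyRange_zero_pairwise_lt (m : Int) :
    (PySem.List.pyRange 0 m).Pairwise (· < ·) := by
  by_cases h : m ≤ 0
  · rw [PySem.List.pyRange_one_eq_nil h]; exact List.Pairwise.nil
  · have : m = (m.toNat : Int) := (Int.toNat_of_nonneg (by omega)).symm
    rw [this, PySem.List.pyRange_zero_natCast]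
    exact List.pairwise_lt_range.map _ (by exact_mod_cast fun a b h => h)

-- lexicographic ≤ on Int pairs, the order sorted2 arranges
def sweepLe (u v : Int × Int) : Prop := u.1 < v.1 ∨ (u.1 = v.1 ∧ u.2 ≤ v.2)

theorem sweepLe_trans {u v w : Int × Int} (h1 : sweepLe u v) (h2 : sweepLe v w) : sweepLe u w := by
  unfold sweepLe at *; omega

theorem insertBy_sweep_pairwise (x : Int × Int) (ys : List (Int × Int))
    (h : ys.Pairwise sweepLe) :
    (PySem.List.insertBy
      (fun a b => decide (a.1 < b.1) || (!decide (b.1 < a.1) && decide (a.2 < b.2)))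
      x ys).Pairwise sweepLe := by
  induction ys with
  | nil => simp [PySem.List.insertBy]
  | cons y t ih =>
    rw [List.pairwise_cons] at h
    show (PySem.List.insertBy _ x (y :: t)).Pairwise sweepLe
    rw [PySem.List.insertBy]
    split
    · rename_i hb
      simp only [Bool.or_eq_true, Bool.and_eq_true, Bool.not_eq_true', decide_eq_true_eq,
        decide_eq_false_iff_not] at hb
      have hxy : sweepLe x y := by unfold sweepLe; omega
      refine List.Pairwise.cons ?_ (List.Pairwise.cons h.1 h.2)
      intro z hz
      rcases List.mem_cons.1 hz with rfl | hz
      · exact hxy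
      · exact sweepLe_trans hxy (h.1 z hz)
    · rename_i hb
      simp only [Bool.or_eq_true, Bool.and_eq_true, Bool.not_eq_true', decide_eq_true_eq,
        decide_eq_false_iff_not] at hb
      have hyx : sweepLe y x := by unfold sweepLe; omega
      refine List.Pairwise.cons ?_ (ih h.2)
      intro z hz
      rcases (PySem.List.mem_insertBy _ x z t).1 hz with rfl | hz
      · exact hyx
      · exact h.1 z hz

theorem foldl_insertBy_sweep_pairwise (xs : List (Int × Int)) :
    ∀ acc : List (Int × Int), acc.Pairwise sweepLe →
    (xs.foldl (fun acc x => PySem.List.insertBy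
      (fun a b => decide (a.1 < b.1) || (!decide (b.1 < a.1) && decide (a.2 < b.2))) x acc) acc).Pairwise sweepLe := by
  induction xs with
  | nil => intro acc h; exact h
  | cons x t ih => intro acc h; exact ih _ (insertBy_sweep_pairwise x acc h)

theorem sorted2_sweep_pairwise (xs : List (Int × Int)) :
    (PySem.List.sorted2 xs (fun p => p.1) (fun p => p.2) false).Pairwise sweepLe := by
  exact foldl_insertBy_sweep_pairwise xs [] List.Pairwise.nil

theorem filter_covered_nil (C : Int → Bool) (lo hi : Int)
    (h : ∀ p, lo ≤ p → p < hi → C p = true) :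
    (PySem.List.pyRange lo hi).filter (fun p => !C p) = [] := by
  apply List.filter_eq_nil_iff.2
  intro p hp
  have := PySem.List.mem_pyRange_one.1 hp
  simp [h p this.1 this.2]

theorem filter_uncovered_self (C : Int → Bool) (lo hi : Int)
    (h : ∀ p, lo ≤ p → p < hi → C p = false) :
    (PySem.List.pyRange lo hi).filter (fun p => !C p) = PySem.List.pyRange lo hi := by
  apply List.filter_eq_self.2
  intro p hp
  have := PySem.List.mem_pyRange_one.1 hp
  simp [h p this.1 this.2]

-- the sweep invariant: folding over sorted gap intervals emits exactly the uncovered positions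
theorem sweep_go (last : Int) (C : Int → Bool) (suf : List (Int × Int)) :
    ∀ (cur : Int) (out : List Int),
    0 ≤ cur →
    suf.Pairwise (fun u v => u.1 ≤ v.1) →
    (∀ iv ∈ suf, iv.1 < iv.2) →
    (∀ iv ∈ suf, ∀ p, iv.1 ≤ p → p < iv.2 → C p = true) →
    (∀ p, cur ≤ p → C p = true → ∃ iv ∈ suf, iv.1 ≤ p ∧ p < iv.2) →
    out = (PySem.List.pyRange 0 (min cur last)).filter (fun p => !C p) →
    ((suf.foldl (fun (s : List Int × Int) iv =>
        (s.1 ++ PySem.List.pyRange s.2 (min iv.1 last), max s.2 iv.2)) (out, cur)).1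
      ++ PySem.List.pyRange (suf.foldl (fun (s : List Int × Int) iv =>
        (s.1 ++ PySem.List.pyRange s.2 (min iv.1 last), max s.2 iv.2)) (out, cur)).2 last)
    = (PySem.List.pyRange 0 last).filter (fun p => !C p) := by
  induction suf with
  | nil =>
    intro cur out hcur _ _ _ hres hout
    simp only [List.foldl_nil]
    by_cases hl : last ≤ cur
    · rw [PySem.List.pyRange_one_eq_nil hl, List.append_nil, hout, min_eq_right hl]
    · rw [hout, min_eq_left (by omega)]
      rw [PySem.List.pyRange_one_append 0 cur last hcur (by omega), List.filter_append]
      congr 1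
      rw [filter_uncovered_self]
      intro p hp _
      by_contra hc
      obtain ⟨iv, hiv, _⟩ := hres p hp (by simpa using hc)
      cases hiv
  | cons iv t ih =>
    intro cur out hcur hs hlt hco hres hout
    simp only [List.foldl_cons]
    rw [List.pairwise_cons] at hs
    have hb : iv.1 < iv.2 := hlt iv List.mem_cons_self
    apply ih (max cur iv.2) (out ++ PySem.List.pyRange cur (min iv.1 last))
      (by omega) hs.2
      (fun v hv => hlt v (List.mem_cons_of_mem _ hv))
      (fun v hv => hco v (List.mem_cons_of_mem _ hv))
    · -- residual points covered by the tail
      intro p hp hcp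
      obtain ⟨v, hv, h1, h2⟩ := hres p (by omega) hcp
      rcases List.mem_cons.1 hv with rfl | hv
      · omega
      · exact ⟨v, hv, h1, h2⟩
    · -- the new out is the filtered prefix up to min (max cur iv.2) last
      by_cases h1 : last ≤ cur
      · rw [PySem.List.pyRange_one_eq_nil (by omega), List.append_nil, hout]
        rw [min_eq_right h1, min_eq_right (by omega)]
      · by_cases h2 : iv.1 ≤ cur
        · rw [PySem.List.pyRange_one_eq_nil (by omega), List.append_nil, hout]
          by_cases h3 : iv.2 ≤ cur
          · rw [show max cur iv.2 = cur by omega]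
          · rw [min_eq_left (by omega), show max cur iv.2 = iv.2 by omega]
            rw [PySem.List.pyRange_one_append 0 cur (min iv.2 last) hcur (by omega),
              List.filter_append]
            rw [filter_covered_nil C cur (min iv.2 last)
              (fun p hp hp2 => hco iv List.mem_cons_self p (by omega) (by omega)),
              List.append_nil]
        · -- cur < iv.1 and cur < last: emit [cur, min iv.1 last)
          have hu : cur ≤ min iv.1 last := by omega
          have hm : min iv.1 last ≤ min (max cur iv.2) last := by omega
          rw [hout, min_eq_left (by omega)]
          rw [PySem.List.pyRange_one_append 0 cur (min (max cur iv.2) last) hcur (by omega),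
            PySem.List.pyRange_one_append cur (min iv.1 last) (min (max cur iv.2) last) hu hm,
            List.filter_append, List.filter_append]
          congr 1
          rw [filter_uncovered_self C cur (min iv.1 last) ?_,
            filter_covered_nil C (min iv.1 last) (min (max cur iv.2) last) ?_, List.append_nil]
          · intro p hp hp2
            exact hco iv List.mem_cons_self p (by omega) (by omega)
          · intro p hp hp2
            by_contra hc
            obtain ⟨v, hv, hv1, hv2⟩ := hres p hp (by simpa using hc)
            rcases List.mem_cons.1 hv with rfl | hv
            · omega
            · have := hs.1 v hv; omega

-- ===== VERDICT (by name: the statement is the Claim_ definition above) =====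
theorem get_problem_spec : Claim_equal_get_problem := by
  intro arr _ _
  unfold Spec_get_problem get_problem get_problem_alt
  simp only []
  rw [no_problem_eq]
  set np := (arr.zip arr.tail).flatMap
      (fun p => if p.2 - p.1 > 40 then PySem.List.pyRange p.1 p.2 else []) with hnp
  set last := PySem.List.pyGetD arr (-1) 0 with hlast
  set positions := PySem.List.pyRange 0 last with hpos
  have hnd : positions.Nodup := (pyRange_zero_pairwise_lt _).imp ne_of_lt
  rw [PySem.Set.ofList_eq_self_of_nodup positions hnd]
  have hdiff : PySem.Set.diff positions (PySem.Set.ofList np)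
      = positions.filter (fun p => !(PySem.Set.contains (PySem.Set.ofList np) p)) := rfl
  rw [hdiff]
  rw [PySem.List.sorted_eq_of_perm_of_pairwise_lt _ _ _ (List.Perm.refl _)
    ((pyRange_zero_pairwise_lt _).filter _)]
  -- both sides are now filters / the sweep; conclude with sweep_go
  set C : Int → Bool := fun p => PySem.Set.contains (PySem.Set.ofList np) p with hC
  set ivs := PySem.List.sorted2 ((arr.zip arr.tail).filter (fun p => p.2 - p.1 > 40))
    (fun p => p.1) (fun p => p.2) false with hivs
  have hperm : ivs.Perm ((arr.zip arr.tail).filter (fun p => p.2 - p.1 > 40)) :=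
    PySem.List.sorted2_perm _ _ _ _
  have hcov : ∀ p : Int, C p = true ↔ ∃ iv ∈ ivs, iv.1 ≤ p ∧ p < iv.2 := by
    intro p
    rw [hC]
    rw [show (PySem.Set.contains (PySem.Set.ofList np) p = true) ↔ p ∈ np from by
      rw [PySem.Set.contains_iff, PySem.Set.mem_ofList]]
    rw [hnp]
    simp only [List.mem_flatMap]
    constructor
    · rintro ⟨q, hq, hpq⟩
      by_cases hc : q.2 - q.1 > 40
      · refine ⟨q, hperm.mem_iff.2 (List.mem_filter.2 ⟨hq, by simpa using hc⟩), ?_⟩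
        rw [if_pos hc] at hpq
        exact PySem.List.mem_pyRange_one.1 hpq
      · rw [if_neg hc] at hpq; cases hpq
    · rintro ⟨iv, hiv, h1, h2⟩
      have := hperm.mem_iff.1 hiv
      obtain ⟨hmem, hcond⟩ := List.mem_filter.1 this
      refine ⟨iv, hmem, ?_⟩
      rw [if_pos (by simpa using hcond)]
      exact PySem.List.mem_pyRange_one.2 ⟨h1, h2⟩
  have := sweep_go last C ivs 0 [] le_rfl
    ((sorted2_sweep_pairwise _).imp (by intro u v h; unfold sweepLe at h; omega))
    (by intro iv hiv
        have := List.mem_filter.1 (hperm.mem_iff.1 hiv)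
        have h := this.2; simp only [decide_eq_true_eq] at h; omega)
    (by intro iv hiv p h1 h2
        exact (hcov p).2 ⟨iv, hiv, h1, h2⟩)
    (by intro p _ hc
        exact (hcov p).1 hc)
    (by rw [PySem.List.pyRange_one_eq_nil (min_le_left 0 last)]; rfl)
  exact this.symm
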